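-- pv_equiv track=rewrite | github.com/jcraig949jfi/Prometheus | cartography/shared/scripts/v2/genus3_phase_test.py | build_congruence_graph
-- ===== SOURCE A (Python) =====
-- def build_congruence_graph(fingerprints):
--     """Build graph: edge between curves if fingerprints match exactly."""
--     edges = []
--     ids = list(fingerprints.keys())
--     for i in range(len(ids)):
--         for j in range(i + 1, len(ids)):
--             if fingerprints[ids[i]] == fingerprints[ids[j]]:
--                 edges.append((ids[i], ids[j]))
--     return edges, ids
-- ===== SOURCE B (Python) =====
-- def build_congruence_graph(fingerprints):
--     """Build graph: edge between curves if fingerprints match exactly."""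
--     ids = list(fingerprints.keys())
--     groups = {}
--     for cid in ids:
--         groups.setdefault(fingerprints[cid], []).append(cid)
--     edges = []
--     for cid in ids:
--         rest = groups[fingerprints[cid]]
--         del rest[0]  # the group's front is cid itself: earlier group members were already removed
--         for other in rest:
--             edges.append((cid, other))
--     return edges, ids
-- ===== Notes on version B (the rewrite author's own statement) =====
-- stated objective: faster
-- what changed: Replaces the all-pairs O(n^2) fingerprint comparison by a single hash-grouping pass (fingerprint -> ids in insertion order) followed by one pass over ids that pops each id off the front of its group and emits edges to the remaining group members, reproducing A's exact (i,j) edge order in O(n + E).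
import Mathlib
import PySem

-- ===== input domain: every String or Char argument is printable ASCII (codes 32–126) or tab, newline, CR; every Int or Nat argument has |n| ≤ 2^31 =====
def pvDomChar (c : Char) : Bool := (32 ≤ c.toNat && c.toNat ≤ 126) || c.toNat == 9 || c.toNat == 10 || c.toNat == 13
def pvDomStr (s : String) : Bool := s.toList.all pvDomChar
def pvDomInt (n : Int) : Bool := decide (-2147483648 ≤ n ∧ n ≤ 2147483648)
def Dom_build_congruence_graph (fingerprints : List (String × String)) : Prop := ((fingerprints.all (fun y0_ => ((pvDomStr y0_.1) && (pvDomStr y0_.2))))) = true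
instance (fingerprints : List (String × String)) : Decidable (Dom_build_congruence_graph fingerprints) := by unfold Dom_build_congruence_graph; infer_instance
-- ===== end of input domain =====

-- B replaces A's all-pairs O(n^2) comparison by hash-grouping ids per fingerprint and one
-- consuming pass that emits each group's remaining members, preserving A's exact edge order (faster).


-- ===== PORT A =====
-- literal transliteration of A: ids = keys, double index loop, append on equal fingerprints
-- (fingerprints[ids[i]] is total here — ids[i] is always a key — so getD with "" is exact)
def build_congruence_graph (fingerprints : List (String × String)) : (List (String × String)) × List String :=
  let d := PySem.Dict.ofList fingerprints
  let ids := d.keys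
  let n := ids.length
  let edges := (List.range n).foldl (fun edges i =>
    (List.range' (i+1) (n - (i+1))).foldl (fun edges j =>
      if d.getD (ids.getD i "") "" == d.getD (ids.getD j "") ""
      then edges ++ [(ids.getD i "", ids.getD j "")] else edges) edges) []
  (edges, ids)

-- ===== PORT B =====
-- literal transliteration of Source B: group ids by fingerprint (setdefault-append = Dict.modify with
-- append), then one pass popping each id off the front of its group and emitting the rest
def build_congruence_graph_alt (fingerprints : List (String × String)) : (List (String × String)) × List String :=
  let d := PySem.Dict.ofList fingerprints
  let ids := d.keys
  let groups := ids.foldl (fun g c => g.modify (d.getD c "") [] (· ++ [c])) PySem.Dict.empty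
  let st := ids.foldl (fun (st : List (String × String) × PySem.Dict String (List String)) c =>
      let rest := (st.2.getD (d.getD c "") []).tail
      (st.1 ++ rest.map (fun o => (c, o)), st.2.insert (d.getD c "") rest)) ([], groups)
  (st.1, ids)

-- ===== PRECONDITION & SPEC =====
def Spec_build_congruence_graph (fingerprints : List (String × String)) (out : (List (String × String)) × List String) : Prop := out = build_congruence_graph_alt fingerprints
instance (fingerprints : List (String × String)) (out : (List (String × String)) × List String) : Decidable (Spec_build_congruence_graph fingerprints out) := by unfold Spec_build_congruence_graph; infer_instance

-- ===== CLAIM (what is proved, stated in full; the proofs are below) =====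
def Claim_equal_build_congruence_graph : Prop := ∀ (fingerprints : List (String × String)), Dom_build_congruence_graph fingerprints → Spec_build_congruence_graph fingerprints (build_congruence_graph fingerprints)

-- ===== LEMMAS AND PROOFS =====

-- reference result: for each id c, edges (c, c') to every LATER id c' with the same fingerprint F
def rowsF (F : String → String) : List String → List (String × String)
  | [] => []
  | c :: rest => (rest.filter (fun c' => F c' == F c)).map (fun c' => (c, c')) ++ rowsF F rest

-- indices k..len-1 read through getD are the suffix drop k
lemma range'_map_getD {α : Type} (d : α) : ∀ (m k : Nat) (xs : List α), k + m = xs.length →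
    (List.range' k m).map (fun j => xs.getD j d) = xs.drop k := by
  intro m
  induction m with
  | zero => intro k xs h; simp [List.drop_of_length_le, ← h]
  | succ m ih =>
    intro k xs h
    have hk : k < xs.length := by omega
    rw [List.range'_succ, List.map_cons, ih (k+1) xs (by omega),
        List.drop_eq_getElem_cons hk, List.getD_eq_getElem xs d hk]

-- A's double loop, seen as a flatMap of its rows, equals rowsF
lemma A_rows (F : String → String) : ∀ (ids : List String),
    (List.range ids.length).flatMap (fun i =>
      ((ids.drop (i+1)).filter (fun x => F x == F (ids.getD i ""))).map
        (fun x => (ids.getD i "", x))) = rowsF F ids := by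
  intro ids
  induction ids with
  | nil => simp [rowsF]
  | cons c rest ih =>
    rw [show (c :: rest).length = rest.length + 1 from rfl, List.range_succ_eq_map,
        List.flatMap_cons, List.flatMap_map]
    simp only [List.getD_cons_succ, List.getD_cons_zero, List.drop_succ_cons, List.drop_zero]
    rw [rowsF, ← ih]

lemma A_edges_eq_rowsF (F : String → String) (ids : List String) :
    (List.range ids.length).foldl (fun edges i =>
      (List.range' (i+1) (ids.length - (i+1))).foldl (fun edges j =>
        if F (ids.getD i "") == F (ids.getD j "")
        then edges ++ [(ids.getD i "", ids.getD j "")] else edges) edges) []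
    = rowsF F ids := by
  have hinner : ∀ (i : Nat) (e : List (String × String)),
      (List.range' (i+1) (ids.length - (i+1))).foldl (fun edges j =>
        if F (ids.getD i "") == F (ids.getD j "")
        then edges ++ [(ids.getD i "", ids.getD j "")] else edges) e
      = e ++ ((ids.drop (i+1)).filter (fun x => F x == F (ids.getD i ""))).map
          (fun x => (ids.getD i "", x)) := by
    intro i e
    rw [PySem.List.foldl_append_if]
    congr 1
    by_cases hi : i + 1 ≤ ids.length
    · rw [← range'_map_getD "" (ids.length - (i+1)) (i+1) ids (by omega)]
      simp only [List.filter_map, List.map_map, Function.comp_def]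
      congr 1
      apply List.filter_congr
      intro j _
      rcases eq_or_ne (F (ids.getD i "")) (F (ids.getD j "")) with h | h
      · rw [h]
      · rw [beq_eq_false_iff_ne.mpr h, beq_eq_false_iff_ne.mpr (Ne.symm h)]
    · have h1 : ids.length - (i+1) = 0 := by omega
      have h2 : ids.drop (i+1) = ([] : List String) := List.drop_of_length_le (by omega)
      simp [h1, h2]
  have hfun : (fun (edges : List (String × String)) (i : Nat) =>
      (List.range' (i+1) (ids.length - (i+1))).foldl (fun edges j =>
        if F (ids.getD i "") == F (ids.getD j "")
        then edges ++ [(ids.getD i "", ids.getD j "")] else edges) edges)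
      = (fun edges i =>
      edges ++ ((ids.drop (i+1)).filter (fun x => F x == F (ids.getD i ""))).map
          (fun x => (ids.getD i "", x))) :=
    funext fun e => funext fun i => hinner i e
  rw [hfun, PySem.List.foldl_append_eq_flatMap, List.nil_append, A_rows]

-- B's grouping pass: every fingerprint's bucket is the ids with that fingerprint, in order
lemma B_groups (F : String → String) (ids : List String) (fp : String) :
    (ids.foldl (fun g c => g.modify (F c) [] (· ++ [c])) PySem.Dict.empty).getD fp []
    = ids.filter (fun c => F c == fp) := by
  have h1 : ids.foldl (fun g c => g.modify (F c) [] (· ++ [c])) PySem.Dict.empty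
      = (ids.map (fun c => (F c, c))).foldl
          (fun (g : PySem.Dict String (List String)) p => g.modify p.1 [] (· ++ [p.2]))
          PySem.Dict.empty := by
    rw [List.foldl_map]
  rw [h1, PySem.Dict.getD_foldl_modify_append, PySem.Dict.getD_empty, List.nil_append,
      List.filter_map, List.map_map]
  simp [Function.comp_def]

-- B's consuming pass: under the bucket invariant it appends exactly rowsF
lemma B_loop (F : String → String) : ∀ (rem : List String)
    (edges0 : List (String × String)) (g : PySem.Dict String (List String)),
    (∀ fp, g.getD fp [] = rem.filter (fun c => F c == fp)) →
    (rem.foldl (fun (st : List (String × String) × PySem.Dict String (List String)) c =>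
        let rest := (st.2.getD (F c) []).tail
        (st.1 ++ rest.map (fun o => (c, o)), st.2.insert (F c) rest)) (edges0, g)).1
    = edges0 ++ rowsF F rem := by
  intro rem
  induction rem with
  | nil => intro edges0 g _; simp [rowsF]
  | cons c rest ih =>
    intro edges0 g hinv
    have hg : (g.getD (F c) []).tail = rest.filter (fun c' => F c' == F c) := by
      rw [hinv (F c), List.filter_cons]
      simp
    rw [List.foldl_cons]
    simp only []
    rw [hg, ih _ _ ?_, rowsF, List.append_assoc]
    intro fp
    rw [PySem.Dict.getD_insert]
    split
    · next h => rw [h]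
    · next h =>
      rw [hinv fp, List.filter_cons]
      have hne : (F c == fp) = false := beq_eq_false_iff_ne.mpr (fun hc => h hc.symm)
      simp [hne]

-- ===== VERDICT (by name: the statement is the Claim_ definition above) =====
theorem build_congruence_graph_spec : Claim_equal_build_congruence_graph := by
  intro fingerprints _
  unfold Spec_build_congruence_graph build_congruence_graph build_congruence_graph_alt
  have hA := A_edges_eq_rowsF (fun c => (PySem.Dict.ofList fingerprints).getD c "")
    (PySem.Dict.ofList fingerprints).keys
  have hB := B_loop (fun c => (PySem.Dict.ofList fingerprints).getD c "")
    (PySem.Dict.ofList fingerprints).keys [] _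
    (fun fp => B_groups (fun c => (PySem.Dict.ofList fingerprints).getD c "")
      (PySem.Dict.ofList fingerprints).keys fp)
  rw [List.nil_append] at hB
  exact congrArg (fun e => (e, (PySem.Dict.ofList fingerprints).keys)) (hA.trans hB.symm)
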